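-- pv_equiv track=rewrite | github.com/ASSERT-KTH/Mokav | experiments/pynguin/c4b/single-return/generated_tests/src_462/2/src_462.py | func
-- ===== SOURCE A (Python) =====
-- def func(*args):
--
-- 	number = int(args[0])
-- 	x = ''
-- 	for i in range(0, number):
-- 	    x = x.replace('it', 'that')
-- 	    if ((i % 2) == 0):
-- 	        x += ' I hate it'
-- 	    if ((i % 2) == 1):
-- 	        x = x.replace('it', 'that')
-- 	        x += ' I love it'
-- 	return(x)
-- ===== SOURCE B (Python) =====
-- def func(*args):
--     number = int(args[0])
--     parts = []
--     for i in range(number):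
--         verb = ' I hate' if i % 2 == 0 else ' I love'
--         obj = ' it' if i == number - 1 else ' that'
--         parts.append(verb + obj)
--     return ''.join(parts)
-- ===== Notes on version B (the rewrite author's own statement) =====
-- stated objective: faster
-- what changed: B computes each phrase directly from i's parity and whether i is the last index and joins once, eliminating A's repeated whole-string .replace('it','that') passes over the growing accumulator (O(n^2) -> O(n)).
import Mathlib
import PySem

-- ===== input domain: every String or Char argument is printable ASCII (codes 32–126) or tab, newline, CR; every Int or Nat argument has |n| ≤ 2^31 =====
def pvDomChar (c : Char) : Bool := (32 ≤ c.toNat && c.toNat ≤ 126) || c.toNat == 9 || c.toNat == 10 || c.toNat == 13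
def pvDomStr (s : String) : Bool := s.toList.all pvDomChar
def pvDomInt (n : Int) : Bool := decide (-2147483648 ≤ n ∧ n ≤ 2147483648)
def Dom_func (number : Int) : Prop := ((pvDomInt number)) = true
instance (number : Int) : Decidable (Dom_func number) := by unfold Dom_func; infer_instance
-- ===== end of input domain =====

-- B builds each phrase directly from i's parity and whether i is last, joining once, instead of
-- A's repeated whole-string .replace passes over the growing accumulator (measured faster).

-- ===== PORT A =====
-- A's loop: each iteration replaces every 'it' with 'that' in the accumulated string,
-- then appends ' I hate it' (i even) or replaces again and appends ' I love it' (i odd).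
-- Worked on List Char (PySem.Chars.replace) since Lean's String ops are kernel-opaque.
def funcLoop : List Int → List Char → List Char
  | [], x => x
  | i :: is, x =>
    let x := PySem.Chars.replace x "it".toList "that".toList
    let x := if PySem.Int.mod i 2 = 0 then x ++ " I hate it".toList else x
    let x := if PySem.Int.mod i 2 = 1 then
               (PySem.Chars.replace x "it".toList "that".toList) ++ " I love it".toList
             else x
    funcLoop is x

def func (number : Int) : String :=
  -- int(args[0]) on an int argument is the identity
  String.ofList (funcLoop (PySem.List.pyRange 0 number 1) [])

-- ===== PORT B =====
def func_alt (number : Int) : String :=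
  String.ofList
    (((PySem.List.pyRange 0 number 1).map (fun i =>
        (if PySem.Int.mod i 2 = 0 then " I hate".toList else " I love".toList) ++
        (if i = number - 1 then " it".toList else " that".toList))).flatten)

-- ===== PRECONDITION & SPEC =====
def Spec_func (number : Int) (out : String) : Prop := out = func_alt number
instance (number : Int) (out : String) : Decidable (Spec_func number out) := by unfold Spec_func; infer_instance

-- ===== CLAIM (what is proved, stated in full; the proofs are below) =====
def Claim_equal_func : Prop := ∀ (number : Int), Dom_func number → Spec_func number (func number)

-- ===== LEMMAS AND PROOFS =====

-- the verb part of phrase i, and the string of all-finished phrases for i < k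
def pvVerb (i : Int) : List Char :=
  if PySem.Int.mod i 2 = 0 then " I hate".toList else " I love".toList

def pvDone (k : Int) : List Char :=
  ((PySem.List.pyRange 0 k 1).map (fun i => pvVerb i ++ " that".toList)).flatten

lemma pvVerb_no_i (i : Int) : 'i' ∉ pvVerb i := by
  unfold pvVerb; split <;> decide

lemma pvDone_no_i (k : Int) : 'i' ∉ pvDone k := by
  unfold pvDone
  intro h
  rcases List.mem_flatten.mp h with ⟨l, hl, hc⟩
  rcases List.mem_map.mp hl with ⟨i, _, rfl⟩
  rcases List.mem_append.mp hc with h1 | h1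
  · exact pvVerb_no_i i h1
  · simp at h1

-- replace "it"→"that" is the identity on strings without 'i'
lemma go_no_i (cs : List Char) (h : 'i' ∉ cs) :
    ∀ (fuel : Nat) (acc : List Char), cs.length ≤ fuel →
      PySem.Chars.replace.go "it".toList "that".toList fuel cs acc = acc.reverse ++ cs := by
  induction cs with
  | nil =>
    intro fuel acc _
    cases fuel <;> simp [PySem.Chars.replace.go]
  | cons c t ih =>
    intro fuel acc hf
    cases fuel with
    | zero => simp at hf
    | succ f =>
      have hc : c ≠ 'i' := fun hh => h (hh ▸ List.mem_cons_self)
      have hpre : ("it".toList).isPrefixOf (c :: t) = false := by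
        simp [List.isPrefixOf]
        intro hh; exact absurd hh.symm hc
      rw [PySem.Chars.replace.go.eq_def]
      simp only [hpre, Bool.false_eq_true, if_false]
      rw [ih (fun hh => h (List.mem_cons_of_mem _ hh)) f (c :: acc) (by simp at hf ⊢; omega)]
      simp

lemma go_tail_it (cs : List Char) (h : 'i' ∉ cs) :
    ∀ (fuel : Nat) (acc : List Char), cs.length + 3 ≤ fuel →
      PySem.Chars.replace.go "it".toList "that".toList fuel (cs ++ " it".toList) acc
        = acc.reverse ++ cs ++ " that".toList := by
  induction cs with
  | nil =>
    intro fuel acc hf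
    obtain ⟨f, rfl⟩ : ∃ f, fuel = f + 3 := ⟨fuel - 3, by omega⟩
    show PySem.Chars.replace.go "it".toList "that".toList (f+3) (' ' :: 'i' :: 't' :: []) acc = _
    rw [PySem.Chars.replace.go.eq_def]
    simp
    rw [PySem.Chars.replace.go.eq_def]
    simp
    rw [PySem.Chars.replace.go.eq_def]
    simp
  | cons c t ih =>
    intro fuel acc hf
    cases fuel with
    | zero => simp at hf
    | succ f =>
      have hc : c ≠ 'i' := fun hh => h (hh ▸ List.mem_cons_self)
      have hpre : ("it".toList).isPrefixOf (c :: (t ++ " it".toList)) = false := by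
        simp [List.isPrefixOf]
        intro hh; exact absurd hh.symm hc
      rw [List.cons_append, PySem.Chars.replace.go.eq_def]
      simp only [hpre, Bool.false_eq_true, if_false]
      rw [ih (fun hh => h (List.mem_cons_of_mem _ hh)) f (c :: acc) (by simp at hf ⊢; omega)]
      simp

lemma replace_no_i (cs : List Char) (h : 'i' ∉ cs) :
    PySem.Chars.replace cs "it".toList "that".toList = cs := by
  rw [PySem.Chars.replace]
  simp only [show ("it".toList).isEmpty = false from rfl, Bool.false_eq_true, if_false]
  simpa using go_no_i cs h cs.length [] (Nat.le_refl _)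

lemma replace_tail_it (cs : List Char) (h : 'i' ∉ cs) :
    PySem.Chars.replace (cs ++ " it".toList) "it".toList "that".toList = cs ++ " that".toList := by
  rw [PySem.Chars.replace]
  simp only [show ("it".toList).isEmpty = false from rfl, Bool.false_eq_true, if_false]
  simpa using go_tail_it cs h (cs ++ " it".toList).length [] (by simp)

lemma funcLoop_append (l l' : List Int) (x : List Char) :
    funcLoop (l ++ l') x = funcLoop l' (funcLoop l x) := by
  induction l generalizing x with
  | nil => rfl
  | cons i is ih => simp [funcLoop, ih]

lemma pvDone_succ (k : Int) (hk : 0 ≤ k) :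
    pvDone (k + 1) = pvDone k ++ (pvVerb k ++ " that".toList) := by
  unfold pvDone
  rw [PySem.List.pyRange_one_succ_right hk]
  simp

-- the single-iteration step on a string of shape core ++ " it" with 'i'-free core
lemma funcLoop_step (k : Int) (cs : List Char) (h : 'i' ∉ cs) :
    funcLoop [k] (cs ++ " it".toList)
      = (cs ++ " that".toList ++ pvVerb k) ++ " it".toList := by
  have hmod : PySem.Int.mod k 2 = 0 ∨ PySem.Int.mod k 2 = 1 := by
    have h1 := PySem.Int.mod_nonneg k (b := 2) (by norm_num)
    have h2 := PySem.Int.mod_lt k (b := 2) (by norm_num)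
    omega
  have hno : 'i' ∉ cs ++ " that".toList := by
    intro hh
    rcases List.mem_append.mp hh with h1 | h1
    · exact h h1
    · simp at h1
  unfold funcLoop
  rw [replace_tail_it cs h]
  rcases hmod with hm | hm
  · simp only [funcLoop, hm]
    norm_num
    unfold pvVerb
    rw [if_pos hm]
    simp [show (" I hate it".toList : List Char) = " I hate".toList ++ " it".toList from rfl]
  · simp only [funcLoop, hm]
    norm_num
    rw [replace_no_i _ hno]
    unfold pvVerb
    rw [if_neg (show ¬ PySem.Int.mod k 2 = 0 by rw [hm]; decide)]
    simp [show (" I love it".toList : List Char) = " I love".toList ++ " it".toList from rfl]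

-- main loop characterisation, for m ≥ 1 iterations
lemma funcLoop_spec : ∀ (m : Nat), 1 ≤ m →
    funcLoop (PySem.List.pyRange 0 (m : Int) 1) []
      = pvDone ((m : Int) - 1) ++ pvVerb ((m : Int) - 1) ++ " it".toList := by
  intro m
  induction m with
  | zero => intro h; omega
  | succ n ih =>
    intro _
    rcases Nat.eq_zero_or_pos n with rfl | hn
    · show funcLoop (PySem.List.pyRange 0 ((0:Nat) + 1 : Nat) 1) [] = _
      norm_num
      decide
    · have hcast : ((n + 1 : Nat) : Int) = (n : Int) + 1 := by push_cast; ring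
      rw [hcast, PySem.List.pyRange_one_succ_right (by positivity), funcLoop_append,
        ih hn, funcLoop_step (n : Int) _ (by
          intro hh
          rcases List.mem_append.mp hh with h1 | h1
          · exact pvDone_no_i _ h1
          · exact pvVerb_no_i _ h1)]
      rw [show ((n : Int) + 1 - 1) = (n : Int) by ring]
      have hD : pvDone (n : Int) = pvDone ((n : Int) - 1) ++ (pvVerb ((n : Int) - 1) ++ " that".toList) := by
        have := pvDone_succ ((n : Int) - 1) (by omega)
        rwa [show ((n : Int) - 1 + 1) = (n : Int) by ring] at this
      rw [hD]
      simp [List.append_assoc]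

-- B's inner map agrees with the done/last split
lemma alt_split (m : Nat) (hm : 1 ≤ m) :
    ((PySem.List.pyRange 0 (m : Int) 1).map (fun i =>
        (if PySem.Int.mod i 2 = 0 then " I hate".toList else " I love".toList) ++
        (if i = (m : Int) - 1 then " it".toList else " that".toList))).flatten
      = pvDone ((m : Int) - 1) ++ pvVerb ((m : Int) - 1) ++ " it".toList := by
  have hsplit : PySem.List.pyRange 0 (m : Int) 1
      = PySem.List.pyRange 0 ((m : Int) - 1) 1 ++ [(m : Int) - 1] := by
    have h0 : (0 : Int) ≤ (m : Int) - 1 := by omega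
    have := PySem.List.pyRange_one_succ_right h0 (a := 0)
    rwa [show ((m : Int) - 1 + 1) = (m : Int) by ring] at this
  rw [hsplit]
  simp only [List.map_append, List.flatten_append, List.map_cons, List.map_nil, List.flatten_cons,
    List.flatten_nil, List.append_nil]
  have h1 : ((PySem.List.pyRange 0 ((m : Int) - 1) 1).map (fun i =>
        (if PySem.Int.mod i 2 = 0 then " I hate".toList else " I love".toList) ++
        (if i = (m : Int) - 1 then " it".toList else " that".toList))).flatten
      = pvDone ((m : Int) - 1) := by
    unfold pvDone
    refine congrArg List.flatten (List.map_congr_left ?_)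
    intro i hi
    have hb := (PySem.List.mem_pyRange_one).mp hi
    rw [if_neg (show ¬ i = (m : Int) - 1 by omega)]
    rfl
  rw [h1]
  unfold pvVerb
  simp [List.append_assoc]

-- ===== VERDICT (by name: the statement is the Claim_ definition above) =====
theorem func_spec : Claim_equal_func := by
  intro number _
  unfold Spec_func func func_alt
  by_cases h : number ≤ 0
  · rw [PySem.List.pyRange_one_eq_nil h]
    rfl
  · have h' : 0 < number := by omega
    obtain ⟨m, rfl⟩ : ∃ m : Nat, number = (m : Int) :=
      ⟨number.toNat, (Int.toNat_of_nonneg h'.le).symm⟩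
    have hm : 1 ≤ m := by exact_mod_cast h'
    rw [funcLoop_spec m hm, alt_split m hm]
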